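-- pv_equiv track=rewrite | github.com/zahias/course_mapping | config.py | extract_primary_grade_from_full_value
-- ===== SOURCE A (Python) =====
-- GRADE_ORDER = [
--     "CR",
--     "A+", "A", "A-",
--     "B+", "B", "B-",
--     "C+", "C", "C-",
--     "D+", "D", "D-"
-- ]
--
-- def extract_primary_grade_from_full_value(value: str) -> str:
--     """
--     Given a full processed string (e.g. "F | 0, CR | 3"), picks the
--     single highest-priority entry based on GRADE_ORDER (where CR is first),
--     and returns it verbatim (including its credit part).
--     """
--     if not isinstance(value, str):
--         return value
--
--     # Split into entries
--     entries = [e.strip() for e in value.split(",") if e.strip()]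
--     parsed = []
--     for entry in entries:
--         if "|" in entry:
--             g, c = entry.split("|", 1)
--             credit = c.strip()
--             parsed.append(
--                 {
--                     "grade": g.strip().upper(),
--                     "credit": credit,
--                     "credit_upper": credit.upper(),
--                     "original": entry,
--                 }
--             )
--         else:
--             stripped = entry.strip()
--             parsed.append(
--                 {
--                     "grade": stripped.upper(),
--                     "credit": "",
--                     "credit_upper": "",
--                     "original": stripped,
--                 }
--             )
--
--     # 1) Explicit CR check
--     for entry in parsed:
--         if entry["grade"] == "CR":
--             return entry["original"]
--
--     # 2) Scan GRADE_ORDER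
--     for grade in GRADE_ORDER:
--         for entry in parsed:
--             if entry["grade"] == grade:
--                 return entry["original"]
--
--     # 3) Prefer any clearly completed attempt (credit > 0 or PASS)
--     for entry in parsed:
--         credit = entry["credit"].strip()
--         if credit:
--             try:
--                 if int(credit) > 0:
--                     return entry["original"]
--             except ValueError:
--                 if entry["credit_upper"] == "PASS":
--                     return entry["original"]
--
--     # 4) Fallback to the very first entry
--     if parsed:
--         return parsed[0]["original"]
--
--     return ""
-- ===== SOURCE B (Python) =====
-- GRADE_ORDER = [
--     "CR",
--     "A+", "A", "A-",
--     "B+", "B", "B-",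
--     "C+", "C", "C-",
--     "D+", "D", "D-"
-- ]
--
-- def _priority(grade, credit, credit_upper):
--     """Rank of one parsed entry: its GRADE_ORDER position if the grade is
--     listed; else 13 for a clearly completed attempt (credit > 0 or PASS);
--     else 14."""
--     try:
--         return GRADE_ORDER.index(grade)
--     except ValueError:
--         pass
--     if credit:
--         try:
--             if int(credit) > 0:
--                 return len(GRADE_ORDER)
--         except ValueError:
--             if credit_upper == "PASS":
--                 return len(GRADE_ORDER)
--     return len(GRADE_ORDER) + 1
--
-- def extract_primary_grade_from_full_value(value: str) -> str:
--     """Single-pass selection: give every entry a numeric priority and keep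
--     the first entry with the lowest priority (argmin), instead of staged
--     re-scans of the entry list."""
--     if not isinstance(value, str):
--         return value
--
--     best = None  # (priority, original) of the best entry seen so far
--     for e in value.split(","):
--         entry = e.strip()
--         if not entry:
--             continue
--         if "|" in entry:
--             g, c = entry.split("|", 1)
--             credit = c.strip()
--             grade, credit_upper, original = g.strip().upper(), credit.upper(), entry
--         else:
--             grade, credit, credit_upper, original = entry.upper(), "", "", entry
--         r = _priority(grade, credit, credit_upper)
--         if best is None or r < best[0]:
--             best = (r, original)
--     return best[1] if best is not None else ""
-- ===== Notes on version B (the rewrite author's own statement) =====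
-- stated objective: alternative
-- what changed: B replaces A's four staged scans (CR pre-scan, nested GRADE_ORDER-by-entries scan, completed-credit scan, first-entry fallback) by a single fused pass that assigns each entry a numeric priority (GRADE_ORDER position, 13 if completed, 14 otherwise) and keeps the first entry attaining the minimum priority (argmin), building no intermediate parsed list.
import Mathlib
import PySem

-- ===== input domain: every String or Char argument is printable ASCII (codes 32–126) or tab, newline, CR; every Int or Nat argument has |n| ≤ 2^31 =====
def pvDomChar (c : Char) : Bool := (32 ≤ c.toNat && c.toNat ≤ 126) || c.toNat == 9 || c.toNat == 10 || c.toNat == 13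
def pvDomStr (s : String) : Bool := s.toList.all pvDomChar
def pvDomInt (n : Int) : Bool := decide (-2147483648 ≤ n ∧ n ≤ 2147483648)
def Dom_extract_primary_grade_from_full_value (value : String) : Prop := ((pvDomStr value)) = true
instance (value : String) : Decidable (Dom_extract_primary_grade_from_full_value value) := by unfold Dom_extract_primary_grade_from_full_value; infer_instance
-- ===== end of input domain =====

-- B replaces A's four staged scans (CR pre-scan, nested GRADE_ORDER × entries scan, completed-credit
-- scan, first-entry fallback) by one fused pass that ranks each entry numerically and keeps the first
-- entry with the minimal rank (objective: alternative algorithm, same cost).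

-- ===== PORT A =====

def pvGradeOrder : List String :=
  ["CR", "A+", "A", "A-", "B+", "B", "B-", "C+", "C", "C-", "D+", "D", "D-"]

-- the body of A's parsing loop; a parsed entry dict (fixed keys) is the tuple
-- (grade, credit, credit_upper, original)
def pvParseEntryA (entry : String) : String × String × String × String :=
  if PySem.Str.isIn "|" entry then
    -- g, c = entry.split("|", 1): since "|" ∈ entry, the split has exactly two pieces
    let parts := (PySem.Str.splitMax? entry "|" 1).getD []
    let g := parts.getD 0 ""
    let c := parts.getD 1 ""
    let credit := PySem.Str.strip c
    (PySem.Str.upper (PySem.Str.strip g), credit, PySem.Str.upper credit, entry)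
  else
    let stripped := PySem.Str.strip entry
    (PySem.Str.upper stripped, "", "", stripped)

-- entries = [e.strip() for e in value.split(",") if e.strip()]  (a nonempty stripped
-- string is truthy, so the comprehension is: map strip, keep the nonempty ones;
-- value.split(",") with sep "," ≠ "" never raises, so the getD [] is exact)
def pvEntriesA (value : String) : List String :=
  (((PySem.Str.split? value ",").getD []).map PySem.Str.strip).filter (fun e => e != "")

def extract_primary_grade_from_full_value (value : String) : String :=
  let parsed := (pvEntriesA value).map pvParseEntryA
  -- 1) explicit CR check
  match parsed.find? (fun e => e.1 == "CR") with
  | some e => e.2.2.2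
  | none =>
    -- 2) nested scan: for grade in GRADE_ORDER: for entry in parsed: …
    match pvGradeOrder.findSome? (fun g => (parsed.find? (fun e => e.1 == g)).map (fun e => e.2.2.2)) with
    | some o => o
    | none =>
      -- 3) credit = entry["credit"].strip(); if credit: int(credit) > 0, or PASS on ValueError
      match parsed.find? (fun e =>
          let credit := PySem.Str.strip e.2.1
          credit != "" &&
            (match PySem.Int.ofStr? credit with
             | some n => decide (0 < n)
             | none => e.2.2.1 == "PASS")) with
      | some e => e.2.2.2
      | none =>
        -- 4) fallback to the very first entry
        match parsed with
        | e :: _ => e.2.2.2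
        | [] => ""

-- ===== PORT B =====

-- _priority(grade, credit, credit_upper): GRADE_ORDER.index is PySem.List.index?
-- (none = the caught ValueError); len(GRADE_ORDER) = 13
def pvRank (grade credit credit_upper : String) : Nat :=
  match PySem.List.index? pvGradeOrder grade with
  | some i => i
  | none =>
    if credit != "" then
      match PySem.Int.ofStr? credit with
      | some n => if 0 < n then 13 else 14
      | none => if credit_upper == "PASS" then 13 else 14
    else 14

-- the parse part of B's loop body, for a piece that survived the emptiness check
def pvParseEntryB (entry : String) : String × String × String × String :=
  if PySem.Str.isIn "|" entry then
    let parts := (PySem.Str.splitMax? entry "|" 1).getD []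
    let credit := PySem.Str.strip (parts.getD 1 "")
    (PySem.Str.upper (PySem.Str.strip (parts.getD 0 "")), credit, PySem.Str.upper credit, entry)
  else
    (PySem.Str.upper entry, "", "", entry)

-- the body of B's loop: skip blank pieces, parse, rank, keep the better of best and this entry
def pvLoopB (best : Option (Nat × String)) (e : String) : Option (Nat × String) :=
  let entry := PySem.Str.strip e
  if entry == "" then best
  else
    let t := pvParseEntryB entry
    let r := pvRank t.1 t.2.1 t.2.2.1
    match best with
    | none => some (r, t.2.2.2)
    | some b => if r < b.1 then some (r, t.2.2.2) else some b

-- best = None; for e in value.split(","): …  (best : Option (rank, original))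
def extract_primary_grade_from_full_value_alt (value : String) : String :=
  match ((PySem.Str.split? value ",").getD []).foldl pvLoopB none with
  | some b => b.2
  | none => ""

-- ===== PRECONDITION & SPEC =====
def Spec_extract_primary_grade_from_full_value (value : String) (out : String) : Prop := out = extract_primary_grade_from_full_value_alt value
instance (value : String) (out : String) : Decidable (Spec_extract_primary_grade_from_full_value value out) := by unfold Spec_extract_primary_grade_from_full_value; infer_instance

-- ===== CLAIM (what is proved, stated in full; the proofs are below) =====
def Claim_equal_extract_primary_grade_from_full_value : Prop := ∀ (value : String), Dom_extract_primary_grade_from_full_value value → Spec_extract_primary_grade_from_full_value value (extract_primary_grade_from_full_value value)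

-- ===== LEMMAS AND PROOFS =====

-- a list with nothing to drop at the front stays a fixpoint of dropWhile after rstrip
theorem pv_dropWhile_rev_fix (p : Char → Bool) (u : List Char) (hu : List.dropWhile p u = u) :
    List.dropWhile p ((List.dropWhile p u.reverse).reverse) = (List.dropWhile p u.reverse).reverse := by
  set v := (List.dropWhile p u.reverse).reverse with hv
  have hpre : v <+: u := by
    have := List.dropWhile_suffix (l := u.reverse) p
    simpa [hv] using this.reverse
  rw [List.dropWhile_eq_self_iff]
  intro hl
  have hul : 0 < u.length := lt_of_lt_of_le hl hpre.length_le
  have h0 : v[0] = u[0] := hpre.getElem hl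
  rw [h0]
  exact (List.dropWhile_eq_self_iff.mp hu) hul

-- str.strip() is idempotent
theorem pv_chars_strip_strip (s : List Char) :
    PySem.Chars.strip (PySem.Chars.strip s) = PySem.Chars.strip s := by
  simp only [PySem.Chars.strip, PySem.Chars.lstrip, PySem.Chars.rstrip]
  rw [pv_dropWhile_rev_fix _ _ (List.dropWhile_idempotent _ _), List.reverse_reverse]
  exact pv_dropWhile_rev_fix _ _ (List.dropWhile_idempotent _ _)

theorem pv_strip_strip (s : String) :
    PySem.Str.strip (PySem.Str.strip s) = PySem.Str.strip s := by
  have h := pv_chars_strip_strip s.toList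
  have hl : (PySem.Str.strip (PySem.Str.strip s)).toList = (PySem.Str.strip s).toList := by
    simp [PySem.Str.toList_strip, h]
  exact String.toList_inj.mp hl

-- find? only looks at the members
theorem pv_find?_congr {α : Type} (l : List α) (p q : α → Bool)
    (h : ∀ x ∈ l, p x = q x) : l.find? p = l.find? q := by
  induction l with
  | nil => rfl
  | cons a t ih =>
    simp only [List.find?_cons, h a (List.mem_cons_self)]
    exact if hq : q a then by simp [hq] else by
      simp [hq, ih (fun x hx => h x (List.mem_cons_of_mem a hx))]

-- on an already-stripped entry the two loop bodies parse to the same tuple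
theorem pv_entry_eq (x : String) (hx : PySem.Str.strip x = x) :
    pvParseEntryA x = pvParseEntryB x := by
  unfold pvParseEntryA pvParseEntryB
  split
  · rfl
  · rw [hx]

theorem pv_entries_stripped (value : String) :
    ∀ x ∈ pvEntriesA value, PySem.Str.strip x = x := by
  intro x hx
  unfold pvEntriesA at hx
  obtain ⟨e, -, rfl⟩ := List.mem_map.mp (List.mem_of_mem_filter hx)
  exact pv_strip_strip e

-- every parsed credit field is already stripped, so A's re-strip in step 3 is the identity
theorem pv_credit_stripped (value : String) :
    ∀ e ∈ (pvEntriesA value).map pvParseEntryA, PySem.Str.strip e.2.1 = e.2.1 := by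
  intro e he
  obtain ⟨x, -, rfl⟩ := List.mem_map.mp he
  unfold pvParseEntryA
  split
  · exact pv_strip_strip _
  · show PySem.Str.strip "" = ""
    rfl

-- ----- B's fold, rephrased as first-minimum selection over the parsed list -----

-- selection key of a parsed entry: (rank, original)
def pvKey (e : String × String × String × String) : Nat × String :=
  (pvRank e.1 e.2.1 e.2.2.1, e.2.2.2)

-- B's comparison step, on the parsed entry (same shape as pvLoopB's non-empty branch)
def pvSelStep (best : Option (Nat × String)) (t : String × String × String × String) :
    Option (Nat × String) :=
  let r := pvRank t.1 t.2.1 t.2.2.1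
  match best with
  | none => some (r, t.2.2.2)
  | some b => if r < b.1 then some (r, t.2.2.2) else some b

-- first-minimum-by-rank fold over keys
def pvFm (b : Nat × String) (xs : List (Nat × String)) : Nat × String :=
  xs.foldl (fun b x => if x.1 < b.1 then x else b) b

theorem pv_fm_le (b : Nat × String) (xs : List (Nat × String)) : (pvFm b xs).1 ≤ b.1 := by
  induction xs generalizing b with
  | nil => simp [pvFm]
  | cons x t ih =>
    show (pvFm (if x.1 < b.1 then x else b) t).1 ≤ b.1
    split
    · exact le_trans (ih _) (by omega)
    · exact ih b

theorem pv_fm_min (b : Nat × String) (xs : List (Nat × String)) :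
    ∀ x ∈ xs, (pvFm b xs).1 ≤ x.1 := by
  induction xs generalizing b with
  | nil => simp
  | cons x t ih =>
    intro y hy
    rcases List.mem_cons.mp hy with rfl | hy
    · show (pvFm (if y.1 < b.1 then y else b) t).1 ≤ y.1
      split
      · exact pv_fm_le _ t
      · exact le_trans (pv_fm_le _ t) (by omega)
    · exact ih _ y hy

theorem pv_fm_find (b : Nat × String) (xs : List (Nat × String)) :
    (b :: xs).find? (fun x => x.1 == (pvFm b xs).1) = some (pvFm b xs) := by
  induction xs generalizing b with
  | nil => simp [pvFm]
  | cons x t ih =>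
    have hstep : pvFm b (x :: t) = pvFm (if x.1 < b.1 then x else b) t := rfl
    rw [hstep]
    by_cases hx : x.1 < b.1
    · rw [if_pos hx]
      have hle : (pvFm x t).1 ≤ x.1 := pv_fm_le x t
      rw [List.find?_cons_of_neg (by simp; omega)]
      exact ih x
    · rw [if_neg hx]
      push_neg at hx
      have hle : (pvFm b t).1 ≤ b.1 := pv_fm_le b t
      have ihb := ih b
      by_cases hbm : b.1 = (pvFm b t).1
      · have hb : pvFm b t = b := by
          rw [List.find?_cons_of_pos (by simp [hbm])] at ihb
          exact (Option.some.inj ihb).symm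
        rw [List.find?_cons_of_pos (by simp [hbm]), hb]
      · have hlt : (pvFm b t).1 < b.1 := lt_of_le_of_ne hle (fun h => hbm h.symm)
        rw [List.find?_cons_of_neg (by simp; omega),
            List.find?_cons_of_neg (by simp; omega)]
        rw [List.find?_cons_of_neg (by simp; omega)] at ihb
        exact ihb

-- B's fused fold over the raw pieces = comparison fold over the parsed list
theorem pv_fold_fusion (l : List String) (acc : Option (Nat × String)) :
    l.foldl pvLoopB acc
    = (((l.map PySem.Str.strip).filter (fun e => e != "")).map pvParseEntryB).foldl pvSelStep acc := by
  induction l generalizing acc with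
  | nil => rfl
  | cons e t ih =>
    rw [List.foldl_cons, List.map_cons, List.filter_cons]
    by_cases h : PySem.Str.strip e = ""
    · have hbe : (PySem.Str.strip e == "") = true := beq_iff_eq.mpr h
      have hstep : pvLoopB acc e = acc := if_pos hbe
      have hb : (PySem.Str.strip e != "") = false := bne_eq_false_iff_eq.mpr h
      rw [hstep, hb]
      simpa using ih acc
    · have hbe : (PySem.Str.strip e == "") = false := beq_eq_false_iff_ne.mpr h
      have hstep : pvLoopB acc e = pvSelStep acc (pvParseEntryB (PySem.Str.strip e)) :=
        if_neg (ne_true_of_eq_false hbe)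
      have hb : (PySem.Str.strip e != "") = true := bne_iff_ne.mpr h
      rw [hstep, hb]
      simpa using ih (pvSelStep acc (pvParseEntryB (PySem.Str.strip e)))

-- the comparison fold started from some b is pvFm over the keys
theorem pv_sel_some (P : List (String × String × String × String)) (b : Nat × String) :
    P.foldl pvSelStep (some b) = some (pvFm b (P.map pvKey)) := by
  induction P generalizing b with
  | nil => rfl
  | cons x t ih =>
    rw [List.foldl_cons]
    have hstep : pvSelStep (some b) x = some (if (pvKey x).1 < b.1 then pvKey x else b) := by
      dsimp only [pvSelStep, pvKey]
      split <;> rfl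
    rw [hstep, ih]
    rfl

-- ----- the rank function, unfolded by the value of GRADE_ORDER.index -----

theorem pv_rank_of_some (g c cu : String) (i : Nat)
    (h : PySem.List.index? pvGradeOrder g = some i) : pvRank g c cu = i := by
  unfold pvRank; rw [h]

theorem pv_rank_of_none (g c cu : String)
    (h : PySem.List.index? pvGradeOrder g = none) :
    pvRank g c cu = (if c != "" then
      match PySem.Int.ofStr? c with
      | some n => if 0 < n then 13 else 14
      | none => if cu == "PASS" then 13 else 14
    else 14) := by
  unfold pvRank; rw [h]

theorem pv_rank_none_ge (g c cu : String)
    (h : PySem.List.index? pvGradeOrder g = none) : 13 ≤ pvRank g c cu := by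
  rw [pv_rank_of_none g c cu h]
  split
  · split <;> split <;> omega
  · omega

theorem pv_rank_le (g c cu : String) : pvRank g c cu ≤ 14 := by
  cases h : PySem.List.index? pvGradeOrder g with
  | some i =>
    rw [pv_rank_of_some g c cu i h]
    obtain ⟨hk, -, -⟩ := PySem.List.getElem_of_index?_eq_some h
    have hlen : pvGradeOrder.length = 13 := rfl
    omega
  | none =>
    rw [pv_rank_of_none g c cu h]
    split
    · split <;> split <;> omega
    · omega

-- for m ≤ 12, rank = m exactly on the entries whose grade is GRADE_ORDER[m]
theorem pv_rank_low_iff (m : Nat) (hm : m ≤ 12) (g c cu : String) :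
    pvRank g c cu = m ↔ g = pvGradeOrder.getD m "" := by
  have hlen : pvGradeOrder.length = 13 := rfl
  have hml : m < pvGradeOrder.length := by omega
  cases h : PySem.List.index? pvGradeOrder g with
  | some i =>
    rw [pv_rank_of_some g c cu i h]
    obtain ⟨hk, hg, -⟩ := PySem.List.getElem_of_index?_eq_some h
    constructor
    · rintro rfl
      rw [List.getD_eq_getElem _ _ hk, hg]
    · intro hgm
      have hnd : pvGradeOrder.Nodup := by decide
      rw [List.getD_eq_getElem _ _ hml] at hgm
      have hgg : pvGradeOrder[i] = pvGradeOrder[m] := by rw [hg, hgm]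
      exact (List.Nodup.getElem_inj_iff hnd).mp hgg
  | none =>
    have h13 := pv_rank_none_ge g c cu h
    constructor
    · intro hr; omega
    · intro hgm
      exfalso
      apply (PySem.List.index?_eq_none_iff _ _).mp h
      rw [hgm, List.getD_eq_getElem _ _ hml]
      exact List.getElem_mem hml

-- rank ≥ 13 means the grade is not listed
theorem pv_rank_high_notmem (g c cu : String) (h : 13 ≤ pvRank g c cu) : g ∉ pvGradeOrder := by
  intro hmem
  obtain ⟨i, hi⟩ := Option.isSome_iff_exists.mp ((PySem.List.index?_isSome_iff _ _).mpr hmem)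
  obtain ⟨hk, -, -⟩ := PySem.List.getElem_of_index?_eq_some hi
  rw [pv_rank_of_some g c cu i hi] at h
  have hlen : pvGradeOrder.length = 13 := rfl
  omega

-- for an unlisted grade, rank = 13 exactly on A's step-3 predicate
theorem pv_rank_13_iff (g c cu : String) (h : g ∉ pvGradeOrder) :
    (pvRank g c cu == 13)
      = (c != "" && (match PySem.Int.ofStr? c with
          | some n => decide (0 < n)
          | none => cu == "PASS")) := by
  rw [pv_rank_of_none g c cu ((PySem.List.index?_eq_none_iff _ _).mpr h)]
  cases hc : (c != "") with
  | false => simp [hc]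
  | true =>
    simp only [hc, if_true, Bool.true_and]
    cases hoc : PySem.Int.ofStr? c with
    | some n => by_cases hn : 0 < n <;> simp [hn]
    | none => cases hp : (cu == "PASS") <;> simp [hp]

-- findSome? finds the value at the first index where f is some
theorem pv_findSome?_at {α β : Type} (L : List α) (f : α → Option β) (m : Nat)
    (hm : m < L.length) (b : β)
    (h1 : ∀ j (hj : j < m), f (L[j]'(by omega)) = none) (h2 : f (L[m]) = some b) :
    L.findSome? f = some b := by
  induction L generalizing m with
  | nil => simp at hm
  | cons x t ih =>
    cases m with
    | zero =>
      simp only [List.getElem_cons_zero] at h2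
      rw [List.findSome?_cons_of_isSome (by simp [h2])]
      exact h2
    | succ m =>
      have hx : f x = none := h1 0 (Nat.succ_pos m)
      rw [List.findSome?_cons_of_isNone (by simp [hx])]
      exact ih m (by simpa using hm) (fun j hj => h1 (j + 1) (by omega)) (by simpa using h2)

-- A's staged cascade returns the first entry of minimal rank
theorem pv_cascade (P : List (String × String × String × String))
    (hcs : ∀ x ∈ P, PySem.Str.strip x.2.1 = x.2.1)
    (m : Nat) (e0 : String × String × String × String)
    (hfind : P.find? (fun x => pvRank x.1 x.2.1 x.2.2.1 == m) = some e0)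
    (hmin : ∀ x ∈ P, m ≤ pvRank x.1 x.2.1 x.2.2.1) :
    (match P.find? (fun e => e.1 == "CR") with
     | some e => e.2.2.2
     | none =>
       match pvGradeOrder.findSome? (fun g => (P.find? (fun e => e.1 == g)).map (fun e => e.2.2.2)) with
       | some o => o
       | none =>
         match P.find? (fun e =>
             let credit := PySem.Str.strip e.2.1
             credit != "" &&
               (match PySem.Int.ofStr? credit with
                | some n => decide (0 < n)
                | none => e.2.2.1 == "PASS")) with
         | some e => e.2.2.2
         | none =>
           match P with
           | e :: _ => e.2.2.2
           | [] => "") = e0.2.2.2 := by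
  have he0P : e0 ∈ P := List.mem_of_find?_eq_some hfind
  have he0r : pvRank e0.1 e0.2.1 e0.2.2.1 = m := by
    have := List.find?_some hfind
    simpa using this
  have hm14 : m ≤ 14 := he0r ▸ pv_rank_le _ _ _
  have hlen : pvGradeOrder.length = 13 := rfl
  by_cases hm12 : m ≤ 12
  · -- a listed grade wins: stage 1 (m = 0) or stage 2 (m > 0)
    have hgfind : P.find? (fun x => x.1 == pvGradeOrder.getD m "") = some e0 := by
      rw [← hfind]
      apply pv_find?_congr
      intro x _
      rw [Bool.eq_iff_iff]
      simp only [beq_iff_eq]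
      exact (pv_rank_low_iff m hm12 x.1 x.2.1 x.2.2.1).symm
    have hj : ∀ j, j < m → P.find? (fun x => x.1 == pvGradeOrder.getD j "") = none := by
      intro j hjm
      rw [List.find?_eq_none]
      intro x hx hb
      have hr : pvRank x.1 x.2.1 x.2.2.1 = j :=
        (pv_rank_low_iff j (by omega) _ _ _).mpr (by simpa using hb)
      have := hmin x hx
      omega
    cases Nat.eq_zero_or_pos m with
    | inl h0 =>
      subst h0
      have hCR : P.find? (fun e => e.1 == "CR") = some e0 := hgfind
      rw [hCR]
    | inr hpos =>
      have hCR : P.find? (fun e => e.1 == "CR") = none := hj 0 hpos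
      rw [hCR]
      have hml : m < pvGradeOrder.length := by omega
      have hfs : pvGradeOrder.findSome?
          (fun g => (P.find? (fun e => e.1 == g)).map (fun e => e.2.2.2)) = some e0.2.2.2 := by
        apply pv_findSome?_at _ _ m hml
        · intro j hjm
          rw [show (pvGradeOrder[j]'(by omega)) = pvGradeOrder.getD j "" from
              (List.getD_eq_getElem _ _ (by omega)).symm, hj j hjm]
          rfl
        · rw [show pvGradeOrder[m] = pvGradeOrder.getD m "" from
              (List.getD_eq_getElem _ _ hml).symm, hgfind]
          rfl
      rw [hfs]
  · -- no listed grade anywhere: stages 1 and 2 come up empty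
    have hnm : ∀ x ∈ P, x.1 ∉ pvGradeOrder := by
      intro x hx
      exact pv_rank_high_notmem _ _ _ (le_trans (by omega) (hmin x hx))
    have hnone : ∀ g ∈ pvGradeOrder, P.find? (fun e => e.1 == g) = none := by
      intro g hg
      rw [List.find?_eq_none]
      intro x hx hb
      exact hnm x hx (by simpa using (beq_iff_eq.mp hb) ▸ hg)
    have hCR : P.find? (fun e => e.1 == "CR") = none := hnone "CR" (by simp [pvGradeOrder])
    have hfs : pvGradeOrder.findSome?
        (fun g => (P.find? (fun e => e.1 == g)).map (fun e => e.2.2.2)) = none := by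
      rw [List.findSome?_eq_none_iff]
      intro g hg
      rw [hnone g hg]
      rfl
    rw [hCR, hfs]
    have hpred : P.find? (fun e =>
        let credit := PySem.Str.strip e.2.1
        credit != "" &&
          (match PySem.Int.ofStr? credit with
           | some n => decide (0 < n)
           | none => e.2.2.1 == "PASS"))
        = P.find? (fun x => pvRank x.1 x.2.1 x.2.2.1 == 13) := by
      apply pv_find?_congr
      intro x hx
      simp only [hcs x hx]
      exact (pv_rank_13_iff _ _ _ (hnm x hx)).symm
    rw [hpred]
    by_cases hm13 : m = 13
    · subst hm13
      rw [hfind]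
    · -- m = 14: everything has rank 14, fall back to the first entry
      have hm' : m = 14 := by omega
      subst hm'
      have hall : ∀ x ∈ P, pvRank x.1 x.2.1 x.2.2.1 = 14 := by
        intro x hx
        exact le_antisymm (pv_rank_le _ _ _) (hmin x hx)
      have h13 : P.find? (fun x => pvRank x.1 x.2.1 x.2.2.1 == 13) = none := by
        rw [List.find?_eq_none]
        intro x hx hb
        rw [hall x hx] at hb
        simp at hb
      rw [h13]
      cases P with
      | nil => simp at hfind
      | cons x t =>
        have hxp : (pvRank x.1 x.2.1 x.2.2.1 == 14) = true := by
          simp [hall x List.mem_cons_self]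
        have hfx : (x :: t).find? (fun y => pvRank y.1 y.2.1 y.2.2.1 == 14) = some x :=
          List.find?_cons_of_pos hxp
        rw [hfx] at hfind
        have hx0 : x = e0 := Option.some.inj hfind
        show x.2.2.2 = e0.2.2.2
        rw [hx0]

theorem pv_main (value : String) :
    extract_primary_grade_from_full_value value = extract_primary_grade_from_full_value_alt value := by
  unfold extract_primary_grade_from_full_value extract_primary_grade_from_full_value_alt
  rw [pv_fold_fusion]
  have hlist : ((((PySem.Str.split? value ",").getD []).map PySem.Str.strip).filter
        (fun e => e != "")).map pvParseEntryB = (pvEntriesA value).map pvParseEntryA := by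
    unfold pvEntriesA
    exact List.map_congr_left (fun x hx => (pv_entry_eq x (pv_entries_stripped value x hx)).symm)
  rw [hlist]
  have hcs := pv_credit_stripped value
  cases hPc : (pvEntriesA value).map pvParseEntryA with
  | nil => rfl
  | cons e t =>
    rw [List.foldl_cons]
    have h0 : pvSelStep none e = some (pvKey e) := rfl
    rw [h0, pv_sel_some]
    set r := pvFm (pvKey e) (t.map pvKey) with hr
    have hfindk : ((e :: t).map pvKey).find? (fun x => x.1 == r.1) = some r := pv_fm_find _ _
    rw [List.find?_map] at hfindk
    obtain ⟨e0, he0, hke0⟩ := Option.map_eq_some_iff.mp hfindk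
    have hfind : (e :: t).find? (fun x => pvRank x.1 x.2.1 x.2.2.1 == r.1) = some e0 := he0
    have hmin : ∀ x ∈ (e :: t), r.1 ≤ pvRank x.1 x.2.1 x.2.2.1 := by
      intro x hx
      rcases List.mem_cons.mp hx with rfl | hx
      · exact pv_fm_le _ _
      · exact pv_fm_min _ _ (pvKey x) (List.mem_map_of_mem hx)
    have hcs' : ∀ x ∈ (e :: t), PySem.Str.strip x.2.1 = x.2.1 := by
      rw [← hPc]; exact hcs
    have hc := pv_cascade (e :: t) hcs' r.1 e0 hfind hmin
    rw [hc]
    show e0.2.2.2 = r.2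
    rw [← hke0]
    rfl

-- ===== VERDICT (by name: the statement is the Claim_ definition above) =====
theorem extract_primary_grade_from_full_value_spec : Claim_equal_extract_primary_grade_from_full_value := by
  intro value _
  unfold Spec_extract_primary_grade_from_full_value
  exact pv_main value
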